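-- pv_equiv track=rewrite | github.com/tommyod/inntaksmodeller | code/article_series_inntaksmodeller_plots.py | add_to_frontier
-- ===== SOURCE A (Python) =====
-- def domination(solution, best_solution, mask):
--     if not any(mask):
--         return True
--
--     solution = [s for (s, m) in zip(solution, mask) if m]
--     best_solution = [s for (s, m) in zip(best_solution, mask) if m]
--
--     not_worse = all(s <= b for (s, b) in zip(solution, best_solution))
--     one_better = any(s < b for (s, b) in zip(solution, best_solution))
--     return not_worse and one_better
--
-- def add_to_frontier(frontier, solution, solution_objective):
--     """Add solution to frontier."""
--     mask = [True] * len(solution_objective)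
--
--     dominated = [False for f in frontier]
--     add_solution = True
--     for i, (f_solution, f_objective) in enumerate(frontier):
--
--         # If the solution under proposal dominates any existing, mark for removal
--         if domination(solution_objective, f_objective, mask):
--             dominated[i] = True
--
--         # If the any existing solution dominates the one under proposal
--         if domination(f_objective, solution_objective, mask):
--             return frontier
--
--     frontier = [f for (f, d) in zip(frontier, dominated) if not d]
--     frontier.append((solution, solution_objective))
--     return frontier
-- ===== SOURCE B (Python) =====
-- def _dom(x, y, k):
--     """x dominates y on the first k objectives; vacuously true for k == 0.
--     One early-exit scan instead of separate all()/any() passes."""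
--     if k == 0:
--         return True
--     strictly = False
--     for a, b in zip(x[:k], y[:k]):
--         if a > b:
--             return False
--         if a < b:
--             strictly = True
--     return strictly
--
-- def add_to_frontier(frontier, solution, solution_objective):
--     """Add solution to frontier."""
--     k = len(solution_objective)
--
--     def go(fr):
--         # None = some frontier element dominates the candidate;
--         # otherwise the list of survivors (elements not dominated by the candidate).
--         if not fr:
--             return []
--         f_sol, f_obj = fr[0]
--         if _dom(f_obj, solution_objective, k):
--             return None
--         rest = go(fr[1:])
--         if rest is None:
--             return None
--         if _dom(solution_objective, f_obj, k):
--             return rest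
--         return [(f_sol, f_obj)] + rest
--
--     survivors = go(frontier)
--     if survivors is None:
--         return frontier
--     return survivors + [(solution, solution_objective)]
-- ===== Notes on version B (the rewrite author's own statement) =====
-- stated objective: alternative
-- what changed: B replaces A's iterative loop with dominated[]-flag bookkeeping and a mask by a single recursive pass returning an Option-style result (None = candidate dominated, else the survivor list built on the way back), with a one-scan early-exit dominance test instead of all()/any() over mask-filtered copies.
import Mathlib
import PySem

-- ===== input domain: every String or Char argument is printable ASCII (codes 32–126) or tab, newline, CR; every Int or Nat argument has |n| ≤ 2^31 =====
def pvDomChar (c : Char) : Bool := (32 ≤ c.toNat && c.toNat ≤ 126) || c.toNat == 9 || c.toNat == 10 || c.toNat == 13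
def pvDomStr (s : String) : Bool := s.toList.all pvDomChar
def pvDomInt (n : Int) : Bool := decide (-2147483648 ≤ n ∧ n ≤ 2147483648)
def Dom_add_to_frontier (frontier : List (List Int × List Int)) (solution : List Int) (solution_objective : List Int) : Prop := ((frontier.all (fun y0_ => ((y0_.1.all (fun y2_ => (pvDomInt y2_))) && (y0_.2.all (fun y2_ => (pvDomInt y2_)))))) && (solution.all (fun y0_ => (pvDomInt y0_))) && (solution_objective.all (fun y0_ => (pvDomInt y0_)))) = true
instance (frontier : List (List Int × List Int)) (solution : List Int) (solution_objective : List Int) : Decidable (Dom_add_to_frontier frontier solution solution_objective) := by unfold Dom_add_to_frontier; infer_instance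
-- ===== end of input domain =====

-- B replaces A's flag-array loop by a recursive Option-valued pass with a one-scan
-- early-exit dominance test (alternative decomposition, same cost).

-- ===== PORT A =====
-- helper `domination` of A, literal: mask filter, then all-≤ and any-< over the zipped pairs
def pyDomination (solution best_solution : List Int) (mask : List Bool) : Bool :=
  if !(mask.any id) then true
  else
    let s := (solution.zip mask).filterMap (fun p => if p.2 then some p.1 else none)
    let b := (best_solution.zip mask).filterMap (fun p => if p.2 then some p.1 else none)
    ((s.zip b).all (fun p => decide (p.1 ≤ p.2))) && ((s.zip b).any (fun p => decide (p.1 < p.2)))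

-- A's loop: builds the dominated flags in order; `none` = the Python `return frontier`
def pyALoop (solution_objective : List Int) (mask : List Bool)
    (rest : List (List Int × List Int)) (acc : List Bool) : Option (List Bool) :=
  match rest with
  | [] => some acc.reverse
  | f :: t =>
    let d := pyDomination solution_objective f.2 mask
    if pyDomination f.2 solution_objective mask then none
    else pyALoop solution_objective mask t (d :: acc)

def add_to_frontier (frontier : List (List Int × List Int)) (solution : List Int) (solution_objective : List Int) : List (List Int × List Int) :=
  let mask := List.replicate solution_objective.length true
  match pyALoop solution_objective mask frontier [] with
  | none => frontier
  | some dominated =>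
      ((frontier.zip dominated).filterMap (fun p => if p.2 then none else some p.1))
        ++ [(solution, solution_objective)]

-- ===== PORT B =====
-- helper `_dom` of B: one early-exit scan over the zipped first-k coordinates
def bDomLoop (pairs : List (Int × Int)) (strictly : Bool) : Bool :=
  match pairs with
  | [] => strictly
  | (a, b) :: t => if a > b then false else if a < b then bDomLoop t true else bDomLoop t strictly

def bDom (x y : List Int) (k : Nat) : Bool :=
  if k = 0 then true
  else bDomLoop ((x.take k).zip (y.take k)) false

-- B's recursion `go`: none = candidate dominated; some = survivors built on the way back
def bGo (solution_objective : List Int) (k : Nat) :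
    List (List Int × List Int) → Option (List (List Int × List Int))
  | [] => some []
  | f :: t =>
    if bDom f.2 solution_objective k then none
    else
      match bGo solution_objective k t with
      | none => none
      | some rest => if bDom solution_objective f.2 k then some rest else some (f :: rest)

def add_to_frontier_alt (frontier : List (List Int × List Int)) (solution : List Int) (solution_objective : List Int) : List (List Int × List Int) :=
  let k := solution_objective.length
  match bGo solution_objective k frontier with
  | none => frontier
  | some survivors => survivors ++ [(solution, solution_objective)]

-- ===== PRECONDITION & SPEC =====
def Spec_add_to_frontier (frontier : List (List Int × List Int)) (solution : List Int) (solution_objective : List Int) (out : List (List Int × List Int)) : Prop := out = add_to_frontier_alt frontier solution solution_objective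
instance (frontier : List (List Int × List Int)) (solution : List Int) (solution_objective : List Int) (out : List (List Int × List Int)) : Decidable (Spec_add_to_frontier frontier solution solution_objective out) := by unfold Spec_add_to_frontier; infer_instance

-- ===== CLAIM (what is proved, stated in full; the proofs are below) =====
def Claim_equal_add_to_frontier : Prop := ∀ (frontier : List (List Int × List Int)) (solution : List Int) (solution_objective : List Int), Dom_add_to_frontier frontier solution solution_objective → Spec_add_to_frontier frontier solution solution_objective (add_to_frontier frontier solution solution_objective)

-- ===== LEMMAS AND PROOFS =====

-- B's scan computes all-≤ && (carry || any-<)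
lemma bDomLoop_eq (pairs : List (Int × Int)) (c : Bool) :
    bDomLoop pairs c
      = ((pairs.all (fun p => decide (p.1 ≤ p.2))) && (c || pairs.any (fun p => decide (p.1 < p.2)))) := by
  induction pairs generalizing c with
  | nil => simp [bDomLoop]
  | cons p t ih =>
    obtain ⟨a, b⟩ := p
    by_cases h1 : a > b
    · simp [bDomLoop, h1, show ¬ (a ≤ b) by omega]
    · by_cases h2 : a < b
      · simp [bDomLoop, h1, h2, ih, show a ≤ b by omega]
      · simp [bDomLoop, h1, h2, ih, show a ≤ b by omega]

-- filtering a zip with all-true mask keeps the first n elements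
lemma filterMap_zip_replicate_true (x : List Int) (n : Nat) :
    (x.zip (List.replicate n true)).filterMap (fun p => if p.2 then some p.1 else none)
      = x.take n := by
  induction x generalizing n with
  | nil => simp
  | cons a t ih =>
    cases n with
    | zero => simp
    | succ m => simp [List.replicate_succ, ih]

-- A's domination with the all-true mask is B's _dom
lemma pyDomination_eq_bDom (x y : List Int) (n : Nat) :
    pyDomination x y (List.replicate n true) = bDom x y n := by
  cases n with
  | zero => simp [pyDomination, bDom]
  | succ m =>
    simp only [pyDomination, bDom, filterMap_zip_replicate_true, bDomLoop_eq]
    simp [List.replicate_succ]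

-- closed form of A's loop
lemma pyALoop_eq (so : List Int) (mask : List Bool) (rest : List (List Int × List Int))
    (acc : List Bool) :
    pyALoop so mask rest acc =
      if rest.any (fun f => pyDomination f.2 so mask) then none
      else some (acc.reverse ++ rest.map (fun f => pyDomination so f.2 mask)) := by
  induction rest generalizing acc with
  | nil => simp [pyALoop]
  | cons f t ih =>
    by_cases h : pyDomination f.2 so mask = true
    · simp [pyALoop, h]
    · simp only [pyALoop, h, ih, List.any_cons, Bool.false_or,
        List.map_cons, List.reverse_cons, List.append_assoc, List.singleton_append]
      by_cases h2 : (t.any fun f => pyDomination f.2 so mask) = true <;> simp [h2]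

-- zip with the mapped flags then drop-flagged = filter on the negated predicate
lemma filterMap_zip_map (xs : List (List Int × List Int)) (g : (List Int × List Int) → Bool) :
    ((xs.zip (xs.map g)).filterMap (fun p => if p.2 then none else some p.1))
      = xs.filter (fun x => !g x) := by
  induction xs with
  | nil => simp
  | cons a t ih =>
    by_cases h : g a = true
    · simp [h, ih]
    · simp [h, ih]

-- closed form of B's recursion
lemma bGo_eq (so : List Int) (k : Nat) (fr : List (List Int × List Int)) :
    bGo so k fr =
      if fr.any (fun f => bDom f.2 so k) then none
      else some (fr.filter (fun f => !bDom so f.2 k)) := by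
  induction fr with
  | nil => simp [bGo]
  | cons f t ih =>
    by_cases h : bDom f.2 so k = true
    · simp [bGo, h]
    · by_cases h2 : (t.any fun f => bDom f.2 so k) = true
      · simp [bGo, h, ih, h2]
      · by_cases h3 : bDom so f.2 k = true <;> simp [bGo, h, ih, h2, h3]

-- ===== VERDICT (by name: the statement is the Claim_ definition above) =====
theorem add_to_frontier_spec : Claim_equal_add_to_frontier := by
  intro frontier solution so _
  show _ = _
  simp only [add_to_frontier, add_to_frontier_alt, pyALoop_eq, bGo_eq, pyDomination_eq_bDom]
  by_cases h : frontier.any (fun f => bDom f.2 so so.length) = true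
  · simp [h]
  · simp [h, filterMap_zip_map]
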